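-- pv_equiv track=rewrite | github.com/johnlawrenceaspden/hobby-code | yo-yo/yo-yo.py | merge_and_sort_reference_lines
-- ===== SOURCE A (Python) =====
-- def merge_and_sort_reference_lines(refdict):
--     grouped = {}
--     for label, pct in refdict.items():
--         grouped.setdefault(pct, []).append(label)
--
--     sorted_pcts = sorted(grouped.keys())
--
--     merged = {}
--     for pct in sorted_pcts:
--         labels = grouped[pct]
--         combined_label = ", ".join(labels)
--         merged[f"{combined_label} (~{pct}%)"] = pct
--     return merged
-- ===== SOURCE B (Python) =====
-- def merge_and_sort_reference_lines(refdict):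
--     # Simpler decomposition: no intermediate grouping dict — sort the distinct
--     # pcts, then build each merged entry by filtering refdict for that pct.
--     merged = {}
--     for pct in sorted(set(refdict.values())):
--         labels = ", ".join(label for label, p in refdict.items() if p == pct)
--         merged[f"{labels} (~{pct}%)"] = pct
--     return merged
-- ===== Notes on version B (the rewrite author's own statement) =====
-- stated objective: simpler
-- what changed: B drops A's intermediate grouping dict entirely: it sorts the distinct pct values once and builds each merged entry by filtering refdict for that pct with a comprehension, instead of building a pct->labels index with setdefault and then sorting its keys.
import Mathlib
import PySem

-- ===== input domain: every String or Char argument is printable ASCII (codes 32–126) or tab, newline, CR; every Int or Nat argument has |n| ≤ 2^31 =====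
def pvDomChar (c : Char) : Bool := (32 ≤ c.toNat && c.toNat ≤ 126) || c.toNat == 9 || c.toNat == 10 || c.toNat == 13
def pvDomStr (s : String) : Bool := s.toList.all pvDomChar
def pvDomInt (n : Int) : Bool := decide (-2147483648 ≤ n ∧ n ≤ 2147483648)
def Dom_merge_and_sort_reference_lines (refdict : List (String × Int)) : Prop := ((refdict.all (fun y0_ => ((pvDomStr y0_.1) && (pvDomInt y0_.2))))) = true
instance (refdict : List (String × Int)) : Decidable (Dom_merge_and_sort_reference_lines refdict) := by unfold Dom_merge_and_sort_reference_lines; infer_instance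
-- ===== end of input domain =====

-- B replaces A's setdefault-grouping-dict + key-sort with sorting the distinct pcts and filtering refdict per pct (simpler decomposition; return values proved equal on all inputs).
-- ===== PORT A =====
-- setdefault(pct, []).append(label) is exactly Dict.modify pct [] (· ++ [label])
def pvGroupA (refdict : List (String × Int)) : PySem.Dict Int (List String) :=
  refdict.foldl (fun d p => d.modify p.2 [] (fun ls => ls ++ [p.1])) PySem.Dict.empty

def merge_and_sort_reference_lines (refdict : List (String × Int)) : List (String × Int) :=
  let grouped := pvGroupA refdict
  let sorted_pcts := PySem.List.sorted grouped.keys (fun x => x) false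
  -- grouped[pct]: pct is always a key of grouped here, so getD with [] is exact
  let merged : PySem.Dict String Int :=
    sorted_pcts.foldl (fun m pct =>
      let labels := grouped.getD pct []
      let combined_label := PySem.Str.join ", " labels
      m.insert (combined_label ++ " (~" ++ PySem.Int.toStr pct ++ "%)") pct) PySem.Dict.empty
  merged.items

-- ===== PORT B =====
def merge_and_sort_reference_lines_alt (refdict : List (String × Int)) : List (String × Int) :=
  let pcts := PySem.List.sorted (PySem.Set.ofList (refdict.map (fun kv => kv.2))) (fun x => x) false
  let merged : PySem.Dict String Int :=
    pcts.foldl (fun m pct =>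
      let labels := PySem.Str.join ", " ((refdict.filter (fun kv => kv.2 == pct)).map (fun kv => kv.1))
      m.insert (labels ++ " (~" ++ PySem.Int.toStr pct ++ "%)") pct) PySem.Dict.empty
  merged.items

-- ===== PRECONDITION & SPEC =====
def Spec_merge_and_sort_reference_lines (refdict : List (String × Int)) (out : List (String × Int)) : Prop := out = merge_and_sort_reference_lines_alt refdict
instance (refdict : List (String × Int)) (out : List (String × Int)) : Decidable (Spec_merge_and_sort_reference_lines refdict out) := by unfold Spec_merge_and_sort_reference_lines; infer_instance

-- ===== CLAIM (what is proved, stated in full; the proofs are below) =====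
def Claim_equal_merge_and_sort_reference_lines : Prop := ∀ (refdict : List (String × Int)), Dom_merge_and_sort_reference_lines refdict → Spec_merge_and_sort_reference_lines refdict (merge_and_sort_reference_lines refdict)

-- ===== LEMMAS AND PROOFS =====

lemma pvGroupA_keys (refdict : List (String × Int)) :
    (pvGroupA refdict).keys = PySem.Set.ofList (refdict.map (fun kv => kv.2)) := by
  unfold pvGroupA
  rw [PySem.Dict.keys_foldl_modify_key]
  simp [PySem.Set.update_nil_left]

lemma pvGroupA_getD (refdict : List (String × Int)) (c : Int) :
    (pvGroupA refdict).getD c [] = (refdict.filter (fun kv => kv.2 == c)).map (fun kv => kv.1) := by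
  unfold pvGroupA
  have h := PySem.Dict.getD_foldl_modify_append (l := refdict.map Prod.swap)
      (d := (PySem.Dict.empty : PySem.Dict Int (List String))) (c := c)
  rw [List.foldl_map] at h
  rw [List.filter_map, List.map_map] at h
  simpa using h

-- ===== VERDICT (by name: the statement is the Claim_ definition above) =====
theorem merge_and_sort_reference_lines_spec : Claim_equal_merge_and_sort_reference_lines := by
  intro refdict _hdom
  unfold Spec_merge_and_sort_reference_lines
  simp only [merge_and_sort_reference_lines, merge_and_sort_reference_lines_alt,
    pvGroupA_keys, pvGroupA_getD]
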